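-- pv_equiv track=rewrite | github.com/MRiabov/Problemologist-AI | worker_heavy/utils/file_validation.py | _target_matches_known_assembly_target
-- ===== SOURCE A (Python) =====
-- def _target_matches_known_assembly_target(target: str, known_targets: set[str]) -> bool:
--     normalized = target.strip()
--     if not normalized:
--         return False
--     if normalized in known_targets:
--         return True
--     return any(
--         normalized.startswith(f"{known_target}.")
--         or normalized.startswith(f"{known_target}/")
--         for known_target in known_targets
--     )
-- ===== SOURCE B (Python) =====
-- def _target_matches_known_assembly_target(target: str, known_targets: set[str]) -> bool:
--     normalized = target.strip()
--     if not normalized: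
--         return False
--     s = set(known_targets)
--     if normalized in s:
--         return True
--     # One pass over the target (independent of the number of known targets):
--     # a known target k matches iff normalized[:i] == k
--     # for some i where normalized[i] is '.' or '/', so check each such prefix in the set.
--     return any(c in "./" and normalized[:i] in s
--                for i, c in enumerate(normalized))
-- ===== Notes on version B (the rewrite author's own statement) =====
-- stated objective: alternative
-- what changed: Instead of scanning every known target and testing it as a prefix of the target (O(K*L) string work), B walks the normalized target once and, at each '.' or '/', checks the preceding prefix for membership in the set, so the work no longer scales with the number of known targets.
import Mathlib
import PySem

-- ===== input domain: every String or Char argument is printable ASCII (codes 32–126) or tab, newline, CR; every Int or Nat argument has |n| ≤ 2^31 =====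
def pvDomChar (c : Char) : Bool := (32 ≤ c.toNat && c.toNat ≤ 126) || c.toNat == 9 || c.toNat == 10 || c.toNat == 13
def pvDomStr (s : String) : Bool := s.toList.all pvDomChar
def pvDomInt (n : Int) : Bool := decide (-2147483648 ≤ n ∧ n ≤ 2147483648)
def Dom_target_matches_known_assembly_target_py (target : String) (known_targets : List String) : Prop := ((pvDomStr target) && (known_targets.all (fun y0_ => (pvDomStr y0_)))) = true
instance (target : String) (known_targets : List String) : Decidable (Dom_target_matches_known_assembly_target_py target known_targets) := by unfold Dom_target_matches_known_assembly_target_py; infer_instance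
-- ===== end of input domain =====

-- B scans the normalized target once, testing the prefix before each '.'/'/' for set membership,
-- instead of testing every known target as a prefix (objective: alternative — the scan is independent of the number of known targets).
-- The Python set[str] argument appears here as the List String of its distinct elements; both programs
-- only test membership of it, so set iteration order cannot affect the Bool result.

-- ===== PORT A =====
def target_matches_known_assembly_target_py (target : String) (known_targets : List String) : Bool :=
  let normalized := PySem.Chars.strip target.toList
  if normalized.isEmpty then false
  else if known_targets.contains (String.ofList normalized) then true
  else known_targets.any (fun k =>
    -- normalized.startswith(f"{known_target}.") or normalized.startswith(f"{known_target}/")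
    PySem.Chars.startswith normalized (k.toList ++ ['.']) ||
    PySem.Chars.startswith normalized (k.toList ++ ['/']))

-- ===== PORT B =====
def target_matches_known_assembly_target_py_alt (target : String) (known_targets : List String) : Bool :=
  let normalized := PySem.Chars.strip target.toList
  if normalized.isEmpty then false
  else
    let s : PySem.Set String := PySem.Set.ofList known_targets
    if PySem.Set.contains s (String.ofList normalized) then true
    else (PySem.List.enumerate normalized).any (fun ic =>
      -- c in "./"  for a single char is just equality with '.' or '/'
      (ic.2 == '.' || ic.2 == '/') &&
      PySem.Set.contains s (String.ofList (PySem.List.slice normalized none (some ic.1))))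

-- ===== PRECONDITION & SPEC =====
def Spec_target_matches_known_assembly_target_py (target : String) (known_targets : List String) (out : Bool) : Prop := out = target_matches_known_assembly_target_py_alt target known_targets
instance (target : String) (known_targets : List String) (out : Bool) : Decidable (Spec_target_matches_known_assembly_target_py target known_targets out) := by unfold Spec_target_matches_known_assembly_target_py; infer_instance

-- ===== CLAIM (what is proved, stated in full; the proofs are below) =====
def Claim_equal_target_matches_known_assembly_target_py : Prop := ∀ (target : String) (known_targets : List String), Dom_target_matches_known_assembly_target_py target known_targets → Spec_target_matches_known_assembly_target_py target known_targets (target_matches_known_assembly_target_py target known_targets)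

-- ===== LEMMAS AND PROOFS =====

-- 'l ++ [c]' is a prefix of n iff n carries c right after a copy of l.
lemma pv_prefix_snoc_iff (l : List Char) (c : Char) (n : List Char) :
    (l ++ [c]) <+: n ↔ l.length < n.length ∧ n.take l.length = l ∧ n[l.length]? = some c := by
  constructor
  · rintro ⟨t, ht⟩
    subst ht
    refine ⟨by simp, ?_, ?_⟩
    · rw [List.append_assoc, List.take_append_of_le_length (by simp), List.take_length]
    · rw [List.append_assoc, List.getElem?_append_right (le_refl _)]
      simp
  · rintro ⟨hlt, htake, hget⟩
    refine ⟨n.drop (l.length + 1), ?_⟩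
    rw [List.getElem?_eq_getElem hlt, Option.some.injEq] at hget
    rw [List.append_assoc]
    conv_rhs => rw [← List.take_append_drop l.length n]
    rw [htake, List.drop_eq_getElem_cons hlt, hget]
    simp

-- membership in set(K) is membership in K
lemma pv_contains_eq (K : List String) (x : String) :
    (PySem.Set.ofList K).contains x = K.contains x := by
  simp [List.contains_eq_mem, PySem.Set.mem_ofList]

-- the two residual scans agree: some known target followed by '.'/'/' prefixes n
-- iff some position of n holding '.'/'/' is preceded by a known target.
lemma pv_any_eq (n : List Char) (K : List String) :
    (K.any (fun k =>
      PySem.Chars.startswith n (k.toList ++ ['.']) ||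
      PySem.Chars.startswith n (k.toList ++ ['/']))) =
    ((PySem.List.enumerate n).any (fun ic =>
      (ic.2 == '.' || ic.2 == '/') &&
      (PySem.Set.ofList K).contains (String.ofList (PySem.List.slice n none (some ic.1))))) := by
  apply Bool.eq_iff_iff.mpr
  simp only [List.any_eq_true, Bool.or_eq_true, Bool.and_eq_true, beq_iff_eq,
    PySem.Chars.startswith_iff, pv_contains_eq, List.contains_eq_mem, decide_eq_true_eq]
  constructor
  · rintro ⟨k, hk, hpre⟩
    have key : ∃ c, (c = '.' ∨ c = '/') ∧ (k.toList ++ [c]) <+: n := by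
      rcases hpre with h | h
      · exact ⟨'.', Or.inl rfl, h⟩
      · exact ⟨'/', Or.inr rfl, h⟩
    obtain ⟨c, hc, hp⟩ := key
    rw [pv_prefix_snoc_iff] at hp
    obtain ⟨hlt, htake, hget⟩ := hp
    rw [List.getElem?_eq_getElem hlt, Option.some.injEq] at hget
    subst hget
    refine ⟨((k.toList.length : Int), n[k.toList.length]), ?_, hc, ?_⟩
    · rw [PySem.List.mem_enumerate_iff]
      exact ⟨k.toList.length, hlt, by simp⟩
    · rw [PySem.List.slice_to_natCast, htake]
      simp
      exact hk
  · rintro ⟨⟨i, c⟩, hmem, hdot, hcont⟩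
    rw [PySem.List.mem_enumerate_iff] at hmem
    obtain ⟨j, hj, heq⟩ := hmem
    simp only [Prod.mk.injEq] at heq
    obtain ⟨hi, hc⟩ := heq
    have hslice : PySem.List.slice n none (some i) = n.take j := by
      rw [hi]; simpa using PySem.List.slice_to_natCast (xs := n) (b := j)
    rw [hslice] at hcont
    refine ⟨String.ofList (n.take j), hcont, ?_⟩
    have hpref : ((String.ofList (n.take j)).toList ++ [c]) <+: n := by
      rw [pv_prefix_snoc_iff]
      have hlen : (String.ofList (n.take j)).toList.length = j := by
        simp [List.length_take]; omega
      rw [hlen]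
      exact ⟨hj, by simp, by rw [List.getElem?_eq_getElem hj, hc]⟩
    rcases hdot with rfl | rfl
    · exact Or.inl hpref
    · exact Or.inr hpref

-- ===== VERDICT (by name: the statement is the Claim_ definition above) =====
theorem target_matches_known_assembly_target_py_spec : Claim_equal_target_matches_known_assembly_target_py := by
  intro target known_targets _
  unfold Spec_target_matches_known_assembly_target_py
  unfold target_matches_known_assembly_target_py target_matches_known_assembly_target_py_alt
  simp only [pv_any_eq, pv_contains_eq]
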